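-- pv_equiv track=rewrite | github.com/BBozhikov/MyMoneyManager | ai/image_processing/preprocessor.py | _largest_block
-- ===== SOURCE A (Python) =====
-- def _largest_block(indices):
--     if len(indices) == 0:
--         return 0, 0
--     best_start = best_end = cur_start = indices[0]
--     max_len = 1
--     for i in range(1, len(indices)):
--         if indices[i] <= indices[i - 1] + 5:
--             cur_len = indices[i] - cur_start
--             if cur_len > max_len:
--                 max_len = cur_len
--                 best_start = cur_start
--                 best_end = indices[i]
--         else:
--             cur_start = indices[i]
--     return int(best_start), int(best_end)
-- ===== SOURCE B (Python) =====
-- def _largest_block(indices):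
--     if len(indices) == 0:
--         return 0, 0
--     # phase 1: partition into maximal runs (break when the gap to the previous exceeds 5)
--     runs = []
--     cur = [indices[0]]
--     for x in indices[1:]:
--         if x <= cur[-1] + 5:
--             cur.append(x)
--         else:
--             runs.append(cur)
--             cur = [x]
--     runs.append(cur)
--     # phase 2: reduce each run, keeping the first strictly-best span
--     best_span = 1
--     best = (indices[0], indices[0])
--     for run in runs:
--         start = run[0]
--         for x in run[1:]:
--             span = x - start
--             if span > best_span:
--                 best_span = span
--                 best = (start, x)
--     return int(best[0]), int(best[1])
-- ===== Notes on version B (the rewrite author's own statement) =====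
-- stated objective: alternative
-- what changed: Replaced A's single fused loop carrying five mutable scalars by a two-phase group-then-reduce: first partition the indices into maximal near-consecutive runs, then reduce each run tracking the best per-element span.
import Mathlib
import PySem

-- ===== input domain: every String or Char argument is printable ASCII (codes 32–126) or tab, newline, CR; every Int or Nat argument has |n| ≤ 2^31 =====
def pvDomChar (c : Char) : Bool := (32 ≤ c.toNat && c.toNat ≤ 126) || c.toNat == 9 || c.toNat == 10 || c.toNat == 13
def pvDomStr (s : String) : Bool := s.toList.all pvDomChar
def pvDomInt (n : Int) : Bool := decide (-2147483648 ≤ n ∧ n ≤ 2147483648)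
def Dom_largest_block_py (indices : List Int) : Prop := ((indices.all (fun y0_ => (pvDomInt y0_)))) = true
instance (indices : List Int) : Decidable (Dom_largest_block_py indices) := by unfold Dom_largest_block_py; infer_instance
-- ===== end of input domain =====

-- B replaces A's fused five-variable loop by a two-phase group-then-reduce (partition into runs, then reduce each run); same O(n) cost, objective: alternative decomposition.

-- ===== PORT A =====
-- A's for-loop over range(1, len): recursion over the tail carrying prev, cur_start, best_start, best_end, max_len.
def aLoop : List Int → Int → Int → Int → Int → Int → Int × Int
  | [], _, _, bs, be, _ => (bs, be)
  | x :: rest, prev, cs, bs, be, ml =>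
    if x ≤ prev + 5 then
      let cl := x - cs
      if cl > ml then aLoop rest x cs cs x cl
      else aLoop rest x cs bs be ml
    else aLoop rest x x bs be ml

def largest_block_py (indices : List Int) : Int × Int :=
  match indices with
  | [] => (0, 0)
  | x :: rest => aLoop rest x x x x 1

-- ===== PORT B =====
-- phase 1: partition into maximal runs (cur[-1] = getLast!, append at the end as in Source B)
def runsLoop (cur : List Int) : List Int → List (List Int)
  | [] => [cur]
  | x :: rest =>
    if x ≤ cur.getLast! + 5 then runsLoop (cur ++ [x]) rest
    else cur :: runsLoop [x] rest

-- phase 2, inner loop over run[1:]: state is (best_span, (best_start, best_end))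
def runFold (start : Int) (st : Int × Int × Int) : List Int → Int × Int × Int
  | [] => st
  | x :: rest =>
    let span := x - start
    if span > st.1 then runFold start (span, start, x) rest
    else runFold start st rest

-- phase 2, outer loop over the runs
def reduceRuns (st : Int × Int × Int) : List (List Int) → Int × Int
  | [] => st.2
  | run :: rest =>
    match run with
    | [] => reduceRuns st rest
    | s :: xs => reduceRuns (runFold s st xs) rest

def largest_block_py_alt (indices : List Int) : Int × Int :=
  match indices with
  | [] => (0, 0)
  | x :: rest => reduceRuns (1, x, x) (runsLoop [x] rest)

-- ===== PRECONDITION & SPEC =====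
def Spec_largest_block_py (indices : List Int) (out : Int × Int) : Prop := out = largest_block_py_alt indices
instance (indices : List Int) (out : Int × Int) : Decidable (Spec_largest_block_py indices out) := by unfold Spec_largest_block_py; infer_instance

-- ===== CLAIM (what is proved, stated in full; the proofs are below) =====
def Claim_equal_largest_block_py : Prop := ∀ (indices : List Int), Dom_largest_block_py indices → Spec_largest_block_py indices (largest_block_py indices)

-- ===== LEMMAS AND PROOFS =====

lemma getLast!_concat (t : List Int) (h x : Int) : (h :: (t ++ [x])).getLast! = x := by
  induction t generalizing h with
  | nil => rfl
  | cons y ys ih => simpa using ih y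

lemma runFold_append (start : Int) (st : Int × Int × Int) (l1 l2 : List Int) :
    runFold start st (l1 ++ l2) = runFold start (runFold start st l1) l2 := by
  induction l1 generalizing st with
  | nil => rfl
  | cons a l ih =>
    simp only [List.cons_append, runFold]
    split <;> exact ih _

-- Fusion lemma: B's group-then-reduce, started mid-run (current run = h :: t, already folded
-- into the state), equals A's fused loop continuation.
lemma fusion (rest : List Int) : ∀ (h : Int) (t : List Int) (st : Int × Int × Int),
    reduceRuns st (runsLoop (h :: t) rest) =
      aLoop rest ((h :: t).getLast!) h (runFold h st t).2.1 (runFold h st t).2.2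
        (runFold h st t).1 := by
  induction rest with
  | nil =>
    intro h t st
    simp only [runsLoop, reduceRuns, aLoop]
  | cons x rest ih =>
    intro h t st
    simp only [runsLoop, aLoop]
    by_cases hx : x ≤ (h :: t).getLast! + 5
    · rw [if_pos hx, if_pos hx, List.cons_append, ih h (t ++ [x]) st]
      rw [getLast!_concat, runFold_append]
      simp only [runFold]
      split <;> rfl
    · rw [if_neg hx, if_neg hx]
      simp only [reduceRuns]
      rw [ih x [] (runFold h st t)]
      rfl

-- ===== VERDICT (by name: the statement is the Claim_ definition above) =====
theorem largest_block_py_spec : Claim_equal_largest_block_py := by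
  intro indices _
  unfold Spec_largest_block_py
  match indices with
  | [] => rfl
  | x :: rest =>
    show aLoop rest x x x x 1 = reduceRuns (1, x, x) (runsLoop [x] rest)
    rw [fusion rest x [] (1, x, x)]
    rfl
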